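-- pv_equiv track=rewrite | github.com/google/mobly | mobly/test_runner.py | _compute_selected_tests
-- ===== SOURCE A (Python) =====
-- import collections
--
-- def _compute_selected_tests(selected_tests):
--     """Computes tests to run for each class from selector strings.
--
--     This function transforms a list of selector strings (such as FooTest or
--     FooTest.test_method_a) to an ordered dict where keys are test classes (strings), and
--     values are lists of selected test methods (strings) in those classes.
--     None means all methods in that class are selected.
--
--     Args:
--         selected_tests: (list of string) list of tests to execute, eg:
--             [
--                 'FooTest',
--                 'BarTest',
--                 'BazTest.test_method_a',
--                 'BazTest.test_method_b'
--             ].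
--             May be empty, in which case all tests in the class are selected.
--
--     Returns:
--         dict: str class -> list(str method).
--         For above example:
--         {
--             'FooTest': None,
--             'BarTest': None,
--             'BazTest': ['test_method_a', 'test_method_b'],
--         }
--     """
--     test_class_name_to_tests = collections.OrderedDict()
--     for test_name in selected_tests:
--         if '.' in test_name:  # Has a test method
--             (test_class_name, test_name) = test_name.split('.')
--             if test_class_name not in test_class_name_to_tests:
--                 # Never seen this class before
--                 test_class_name_to_tests[test_class_name] = [test_name]
--             elif test_class_name_to_tests[test_class_name] is None:
--                 # Already running all tests in this class, so ignore this extra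
--                 # test.
--                 pass
--             else:
--                 test_class_name_to_tests[test_class_name].append(test_name)
--         else:  # No test method; run all tests in this class.
--             test_class_name_to_tests[test_name] = None
--     return test_class_name_to_tests
-- ===== SOURCE B (Python) =====
-- import collections
--
-- def _compute_selected_tests(selected_tests):
--     # Two-pass: first collect classes selected wholesale (no '.'), then build the
--     # ordered mapping in one uniform pass with collapsed branching.
--     bare_classes = {t for t in selected_tests if '.' not in t}
--     result = collections.OrderedDict()
--     for selector in selected_tests:
--         if '.' in selector:
--             cls, method = selector.split('.')
--         else:
--             cls, method = selector, None
--         if cls not in result: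
--             result[cls] = None if cls in bare_classes else []
--         if method is not None and cls not in bare_classes:
--             result[cls].append(method)
--     return result
-- ===== Notes on version B (the rewrite author's own statement) =====
-- stated objective: alternative
-- what changed: A's single loop with four-way branching on dict state is replaced by a two-pass decomposition: first collect the set of classes selected wholesale (selectors without '.'), then build the ordered mapping in one uniform pass keyed off that set.
import Mathlib
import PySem

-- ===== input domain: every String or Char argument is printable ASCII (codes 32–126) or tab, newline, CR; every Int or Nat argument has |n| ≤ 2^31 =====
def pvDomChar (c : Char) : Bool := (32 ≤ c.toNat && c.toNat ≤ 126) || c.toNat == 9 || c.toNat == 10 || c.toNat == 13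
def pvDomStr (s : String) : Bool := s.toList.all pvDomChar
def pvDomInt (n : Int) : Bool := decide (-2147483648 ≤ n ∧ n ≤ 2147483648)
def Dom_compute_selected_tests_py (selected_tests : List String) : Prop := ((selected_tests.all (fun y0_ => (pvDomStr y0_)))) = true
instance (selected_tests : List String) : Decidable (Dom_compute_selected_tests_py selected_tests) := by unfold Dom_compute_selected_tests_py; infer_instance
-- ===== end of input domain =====

-- B replaces A's single branch-heavy loop by a two-pass decomposition (bare-class set first,
-- then one uniform building pass); alternative structure, same cost.


-- ===== PORT A =====
-- one loop step of A's for-loop over selected_tests (OrderedDict as PySem.Dict)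
def stepA (d : PySem.Dict String (Option (List String))) (t : String) :
    PySem.Dict String (Option (List String)) :=
  if PySem.Str.isIn "." t = true then
    match PySem.Str.split? t "." with
    | some [c, m] =>
        if d.contains c = false then d.insert c (some [m])
        else
          match d.get? c with
          | some none => d
          | some (some ms) => d.insert c (some (ms ++ [m]))
          | none => d
    | _ => d   -- Python raises ValueError here (split gives ≠ 2 parts); excluded by Pre_
  else
    d.insert t none

def compute_selected_tests_py (selected_tests : List String) : List (String × Option (List String)) :=
  (selected_tests.foldl stepA PySem.Dict.empty).items

-- ===== PORT B =====
def bareSetB (selected_tests : List String) : PySem.Set String :=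
  PySem.Set.ofList (selected_tests.filter (fun t => !(PySem.Str.isIn "." t)))

-- one loop step of B's building pass (S = the bare-class set)
def stepB (S : PySem.Set String) (d : PySem.Dict String (Option (List String))) (t : String) :
    PySem.Dict String (Option (List String)) :=
  let p : String × Option String :=
    if PySem.Str.isIn "." t = true then
      match PySem.Str.split? t "." with
      | some [c, m] => (c, some m)
      | _ => (t, none)   -- Python raises ValueError here; excluded by Pre_
    else (t, none)
  let d1 := if d.contains p.1 = true then d
            else d.insert p.1 (if PySem.Set.contains S p.1 = true then none else some [])
  match p.2 with
  | none => d1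
  | some m =>
      if PySem.Set.contains S p.1 = true then d1
      else
        match d1.get? p.1 with   -- result[cls].append(method): cls is present and holds a list here
        | some (some ms) => d1.insert p.1 (some (ms ++ [m]))
        | _ => d1

def compute_selected_tests_py_alt (selected_tests : List String) : List (String × Option (List String)) :=
  (selected_tests.foldl (stepB (bareSetB selected_tests)) PySem.Dict.empty).items

-- ===== PRECONDITION & SPEC =====
-- Pre_ excludes exactly the lists containing a selector with two or more dots
-- ('A.B.C'), on which A (and B) raise ValueError while unpacking the split.
def Pre_compute_selected_tests_py (selected_tests : List String) : Prop :=
  ∀ t ∈ selected_tests, PySem.Str.isIn "." t = true →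
    ((PySem.Str.split? t ".").getD []).length = 2
instance (selected_tests : List String) : Decidable (Pre_compute_selected_tests_py selected_tests) := by
  unfold Pre_compute_selected_tests_py; infer_instance

def pvWitness_compute_selected_tests_py : List String :=
  ["FooTest", "BazTest.test_a", "BazTest.test_b", "FooTest.x", "BarTest"]

def Spec_compute_selected_tests_py (selected_tests : List String) (out : List (String × Option (List String))) : Prop := out = compute_selected_tests_py_alt selected_tests
instance (selected_tests : List String) (out : List (String × Option (List String))) : Decidable (Spec_compute_selected_tests_py selected_tests out) := by unfold Spec_compute_selected_tests_py; infer_instance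

-- ===== CLAIM (what is proved, stated in full; the proofs are below) =====
def Claim_equal_compute_selected_tests_py : Prop := ∀ (selected_tests : List String), Dom_compute_selected_tests_py selected_tests → Pre_compute_selected_tests_py selected_tests → Spec_compute_selected_tests_py selected_tests (compute_selected_tests_py selected_tests)

-- ===== LEMMAS AND PROOFS =====

-- the class a selector names, and its method (if any)
def classOf (t : String) : String :=
  if PySem.Str.isIn "." t = true then
    match PySem.Str.split? t "." with
    | some (c :: _) => c
    | _ => t
  else t

def methodOf? (t : String) : Option String :=
  if PySem.Str.isIn "." t = true then
    match PySem.Str.split? t "." with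
    | some [_, m] => some m
    | _ => none
  else none

lemma split_shape (t : String) (h1 : PySem.Str.isIn "." t = true)
    (h2 : ((PySem.Str.split? t ".").getD []).length = 2) :
    ∃ c m, PySem.Str.split? t "." = some [c, m] ∧ classOf t = c ∧ methodOf? t = some m := by
  have hsome : PySem.Str.split? t "." = some (PySem.Chars.splitOn t.toList ['.'] |>.map String.ofList) := by
    simp [PySem.Str.split?, PySem.Chars.split?]
  rw [hsome] at h2 ⊢
  simp only [Option.getD_some] at h2
  obtain ⟨c, m, hcm⟩ := List.length_eq_two.1 h2
  rw [hcm]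
  refine ⟨c, m, rfl, ?_, ?_⟩
  · unfold classOf; rw [h1, if_pos rfl, hsome, hcm]
  · unfold methodOf?; rw [h1, if_pos rfl, hsome, hcm]
def bares (l : List String) : List String := l.filter (fun t => !(PySem.Str.isIn "." t))
def metsOf (c : String) (l : List String) : List String :=
  l.filterMap (fun t => if classOf t = c then methodOf? t else none)
lemma classOf_bare (t : String) (h : PySem.Str.isIn "." t = false) :
    classOf t = t ∧ methodOf? t = none := by
  unfold classOf methodOf?; rw [h]; simp
lemma mem_map_classOf_of_mem_bares {c : String} {l : List String} (h : c ∈ bares l) :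
    c ∈ l.map classOf := by
  rw [bares, List.mem_filter] at h
  obtain ⟨hm, hb⟩ := h
  simp only [Bool.not_eq_true'] at hb
  exact List.mem_map.2 ⟨c, hm, (classOf_bare c hb).1⟩
lemma metsOf_eq_nil_of_not_mem {c : String} {l : List String} (h : c ∉ l.map classOf) :
    metsOf c l = [] := by
  rw [metsOf, List.filterMap_eq_nil_iff]
  intro t ht
  rw [if_neg (fun hc => h (List.mem_map.2 ⟨t, ht, hc⟩))]
def classesOf (l : List String) : PySem.Set String := PySem.Set.ofList (l.map classOf)
lemma bares_append (l : List String) (t : String) :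
    bares (l ++ [t]) = bares l ++ (if PySem.Str.isIn "." t = true then [] else [t]) := by
  rw [bares, List.filter_append]
  congr 1
  rw [List.filter_singleton]
  cases h : PySem.Str.isIn "." t <;> simp

lemma metsOf_append (c : String) (l : List String) (t : String) :
    metsOf c (l ++ [t]) = metsOf c l ++ (if classOf t = c then methodOf? t else none).toList := by
  rw [metsOf, List.filterMap_append]
  congr 1

lemma classesOf_append (l : List String) (t : String) :
    classesOf (l ++ [t]) = PySem.Set.add (classesOf l) (classOf t) := by
  rw [classesOf, List.map_append, List.map_singleton, PySem.Set.ofList_append_singleton]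
  rfl

lemma foldA_char (l : List String) (hpre : Pre_compute_selected_tests_py l) :
    (l.foldl stepA PySem.Dict.empty).keys = classesOf l ∧
    ∀ c ω, (l.foldl stepA PySem.Dict.empty).getD c ω =
      if c ∈ l.map classOf then (if c ∈ bares l then none else some (metsOf c l)) else ω := by
  induction l using List.reverseRecOn with
  | nil =>
      refine ⟨by simp [classesOf, PySem.Set.ofList], ?_⟩
      intro c ω; simp [PySem.Dict.getD_empty, bares]
  | append_singleton l t ih =>
      obtain ⟨hk, hv⟩ := ih (fun u hu => hpre u (List.mem_append_left _ hu))
      rw [List.foldl_append]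
      simp only [List.foldl_cons, List.foldl_nil]
      set d := l.foldl stepA PySem.Dict.empty with hd
      have hcont : ∀ c, d.contains c = true ↔ c ∈ l.map classOf := by
        intro c
        rw [PySem.Dict.contains_iff_mem_keys, hk, classesOf, PySem.Set.mem_ofList]
      have hmem_iff : ∀ c, c ∈ (l ++ [t]).map classOf ↔ c ∈ l.map classOf ∨ c = classOf t := by
        intro c; rw [List.map_append, List.mem_append, List.map_singleton, List.mem_singleton]
      by_cases h1 : PySem.Str.isIn "." t = true
      · obtain ⟨c0, m, hsp, hcl, hmo⟩ :=
          split_shape t h1 (hpre t (List.mem_append_right _ (List.mem_singleton.2 rfl)) h1)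
        have hstep : stepA d t =
            (if d.contains c0 = false then d.insert c0 (some [m])
             else match d.get? c0 with
                  | some none => d
                  | some (some ms) => d.insert c0 (some (ms ++ [m]))
                  | none => d) := by
          rw [stepA, if_pos h1, hsp]
        have hbar_eq : bares (l ++ [t]) = bares l := by
          rw [bares_append, if_pos h1, List.append_nil]
        by_cases hmem : c0 ∈ l.map classOf
        · rw [hstep, if_neg (by rw [(hcont c0).2 hmem]; simp)]
          have hvs : d.get? c0 = some (if c0 ∈ bares l then none else some (metsOf c0 l)) := by
            have hs : (d.get? c0).isSome = true := by
              rw [← PySem.Dict.contains_eq_isSome_get?]; exact (hcont c0).2 hmem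
            obtain ⟨v, hv0⟩ := Option.isSome_iff_exists.1 hs
            have := hv c0 (some [])
            rw [PySem.Dict.getD_eq_get?_getD, hv0, Option.getD_some, if_pos hmem] at this
            rw [hv0, this]
          have hkeys_goal : d.keys = classesOf (l ++ [t]) := by
            rw [hk, classesOf_append, hcl,
              PySem.Set.add_of_mem (by rw [classesOf, PySem.Set.mem_ofList]; exact hmem)]
          by_cases hbar : c0 ∈ bares l
          · rw [hvs, if_pos hbar]
            refine ⟨hkeys_goal, ?_⟩
            intro c ω
            rw [hv c ω]
            by_cases hc : c = c0
            · subst hc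
              simp [hmem_iff, hbar_eq, metsOf_append, hmem, hbar]
            · by_cases hcm : c ∈ l.map classOf
              · simp [hmem_iff, hbar_eq, metsOf_append, hcm, hcl,
                  (show ¬ (c0 = c) from fun h => hc h.symm)]
              · simp [hmem_iff, hbar_eq, hcm, hc, hcl,
                  (show ¬ (c0 = c) from fun h => hc h.symm)]
          · rw [hvs, if_neg hbar]
            refine ⟨by rw [PySem.Dict.keys_insert_of_contains _ _ ((hcont c0).2 hmem)]
                       exact hkeys_goal, ?_⟩
            intro c ω
            rw [PySem.Dict.getD_insert]
            by_cases hc : c = c0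
            · subst hc
              simp [hmem_iff, hbar_eq, metsOf_append, hmem, hbar, hcl, hmo]
            · rw [if_neg hc, hv c ω]
              by_cases hcm : c ∈ l.map classOf
              · simp [hmem_iff, hbar_eq, metsOf_append, hcm, hcl,
                  (show ¬ (c0 = c) from fun h => hc h.symm)]
              · simp [hmem_iff, hbar_eq, hcm, hc, hcl,
                  (show ¬ (c0 = c) from fun h => hc h.symm)]
        · have hcf : d.contains c0 = false := by
            rw [← Bool.not_eq_true, hcont c0]; exact hmem
          rw [hstep, if_pos hcf]
          refine ⟨?_, ?_⟩
          · rw [PySem.Dict.keys_insert_of_not_contains _ _ hcf, hk, classesOf_append, hcl,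
              PySem.Set.add_of_not_mem (by rw [classesOf, PySem.Set.mem_ofList]; exact hmem)]
          · intro c ω
            rw [PySem.Dict.getD_insert]
            by_cases hc : c = c0
            · subst hc
              rw [if_pos rfl]
              have hnb : c ∉ bares l := fun hb => hmem (mem_map_classOf_of_mem_bares hb)
              simp [hmem_iff, hbar_eq, metsOf_append, hcl, hmo, hnb,
                metsOf_eq_nil_of_not_mem hmem]
            · rw [if_neg hc, hv c ω]
              by_cases hcm : c ∈ l.map classOf
              · simp [hmem_iff, hbar_eq, metsOf_append, hcm, hcl,
                  (show ¬ (c0 = c) from fun h => hc h.symm)]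
              · simp [hmem_iff, hbar_eq, hcm, hc, hcl,
                  (show ¬ (c0 = c) from fun h => hc h.symm)]
      · have h1' : PySem.Str.isIn "." t = false := by
          rw [← Bool.not_eq_true]; exact h1
        obtain ⟨hclb, hmob⟩ := classOf_bare t h1'
        have hstep : stepA d t = d.insert t none := by rw [stepA, if_neg h1]
        have hbar_eq : bares (l ++ [t]) = bares l ++ [t] := by
          rw [bares_append, if_neg h1]
        rw [hstep]
        refine ⟨?_, ?_⟩
        · rw [classesOf_append, hclb]
          by_cases hmem : t ∈ l.map classOf
          · rw [PySem.Dict.keys_insert_of_contains _ _ ((hcont t).2 hmem), hk,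
              PySem.Set.add_of_mem (by rw [classesOf, PySem.Set.mem_ofList]; exact hmem)]
          · rw [PySem.Dict.keys_insert_of_not_contains _ _
              (by rw [← Bool.not_eq_true, hcont t]; exact hmem), hk,
              PySem.Set.add_of_not_mem (by rw [classesOf, PySem.Set.mem_ofList]; exact hmem)]
        · intro c ω
          rw [PySem.Dict.getD_insert]
          by_cases hc : c = t
          · subst hc
            rw [if_pos rfl]
            simp [hmem_iff, hbar_eq, hclb]
          · rw [if_neg hc, hv c ω]
            by_cases hcm : c ∈ l.map classOf
            · simp [hmem_iff, hbar_eq, metsOf_append, hcm, hclb, hmob, hc,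
                (show ¬ (t = c) from fun h => hc h.symm)]
            · simp [hmem_iff, hbar_eq, hcm, hc, hclb,
                (show ¬ (t = c) from fun h => hc h.symm)]
lemma foldB_char (S : PySem.Set String) (l : List String) (hpre : Pre_compute_selected_tests_py l) :
    (l.foldl (stepB S) PySem.Dict.empty).keys = classesOf l ∧
    ∀ c ω, (l.foldl (stepB S) PySem.Dict.empty).getD c ω =
      if c ∈ l.map classOf then (if PySem.Set.contains S c = true then none else some (metsOf c l)) else ω := by
  induction l using List.reverseRecOn with
  | nil =>
      refine ⟨by simp [classesOf, PySem.Set.ofList], ?_⟩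
      intro c ω; simp [PySem.Dict.getD_empty]
  | append_singleton l t ih =>
      obtain ⟨hk, hv⟩ := ih (fun u hu => hpre u (List.mem_append_left _ hu))
      rw [List.foldl_append]
      simp only [List.foldl_cons, List.foldl_nil]
      set d := l.foldl (stepB S) PySem.Dict.empty with hd
      have hcont : ∀ c, d.contains c = true ↔ c ∈ l.map classOf := by
        intro c
        rw [PySem.Dict.contains_iff_mem_keys, hk, classesOf, PySem.Set.mem_ofList]
      have hmem_iff : ∀ c, c ∈ (l ++ [t]).map classOf ↔ c ∈ l.map classOf ∨ c = classOf t := by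
        intro c; rw [List.map_append, List.mem_append, List.map_singleton, List.mem_singleton]
      by_cases h1 : PySem.Str.isIn "." t = true
      · obtain ⟨c0, m, hsp, hcl, hmo⟩ :=
          split_shape t h1 (hpre t (List.mem_append_right _ (List.mem_singleton.2 rfl)) h1)
        have hstep : stepB S d t =
            (let d1 := if d.contains c0 = true then d
                       else d.insert c0 (if PySem.Set.contains S c0 = true then none else some [])
             if PySem.Set.contains S c0 = true then d1
             else
               match d1.get? c0 with
               | some (some ms) => d1.insert c0 (some (ms ++ [m]))
               | _ => d1) := by
          rw [stepB, if_pos h1, hsp]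
        by_cases hS : PySem.Set.contains S c0 = true
        · rw [hstep]
          simp only [if_pos hS]
          by_cases hmem : c0 ∈ l.map classOf
          · rw [if_pos ((hcont c0).2 hmem)]
            refine ⟨by rw [hk, classesOf_append, hcl,
              PySem.Set.add_of_mem (by rw [classesOf, PySem.Set.mem_ofList]; exact hmem)], ?_⟩
            intro c ω
            rw [hv c ω]
            by_cases hc : c = c0
            · subst hc
              simp [hmem_iff, hcl, hmem, metsOf_append, (PySem.Set.contains_iff S c).1 hS]
            · by_cases hcm : c ∈ l.map classOf
              · simp [hmem_iff, metsOf_append, hcm, hcl,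
                  (show ¬ (c0 = c) from fun h => hc h.symm)]
              · simp [hmem_iff, hcm, hc, hcl,
                  (show ¬ (c0 = c) from fun h => hc h.symm)]
          · have hcf : d.contains c0 = false := by
              rw [← Bool.not_eq_true, hcont c0]; exact hmem
            rw [if_neg (by rw [hcf]; simp)]
            refine ⟨?_, ?_⟩
            · rw [PySem.Dict.keys_insert_of_not_contains _ _ hcf, hk, classesOf_append, hcl,
                PySem.Set.add_of_not_mem (by rw [classesOf, PySem.Set.mem_ofList]; exact hmem)]
            · intro c ω
              rw [PySem.Dict.getD_insert]
              by_cases hc : c = c0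
              · subst hc
                simp [hmem_iff, hcl, (PySem.Set.contains_iff S c).1 hS]
              · rw [if_neg hc, hv c ω]
                by_cases hcm : c ∈ l.map classOf
                · simp [hmem_iff, metsOf_append, hcm, hcl,
                    (show ¬ (c0 = c) from fun h => hc h.symm)]
                · simp [hmem_iff, hcm, hc, hcl,
                    (show ¬ (c0 = c) from fun h => hc h.symm)]
        · -- class not selected wholesale: append the method
          by_cases hmem : c0 ∈ l.map classOf
          · have hget : d.get? c0 = some (some (metsOf c0 l)) := by
              have hs : (d.get? c0).isSome = true := by
                rw [← PySem.Dict.contains_eq_isSome_get?]; exact (hcont c0).2 hmem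
              obtain ⟨v, hv0⟩ := Option.isSome_iff_exists.1 hs
              have := hv c0 (some [])
              rw [PySem.Dict.getD_eq_get?_getD, hv0, Option.getD_some, if_pos hmem,
                if_neg hS] at this
              rw [hv0, this]
            rw [hstep]
            simp only [if_neg hS]
            rw [if_pos ((hcont c0).2 hmem)]
            simp only [hget]
            refine ⟨by rw [PySem.Dict.keys_insert_of_contains _ _ ((hcont c0).2 hmem), hk,
              classesOf_append, hcl,
              PySem.Set.add_of_mem (by rw [classesOf, PySem.Set.mem_ofList]; exact hmem)], ?_⟩
            intro c ω
            rw [PySem.Dict.getD_insert]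
            by_cases hc : c = c0
            · subst hc
              simp [hmem_iff, hcl, hmem, metsOf_append, hmo,
                (show c ∉ S from fun h => hS ((PySem.Set.contains_iff S c).2 h))]
            · rw [if_neg hc, hv c ω]
              by_cases hcm : c ∈ l.map classOf
              · simp [hmem_iff, metsOf_append, hcm, hcl,
                  (show ¬ (c0 = c) from fun h => hc h.symm)]
              · simp [hmem_iff, hcm, hc, hcl,
                  (show ¬ (c0 = c) from fun h => hc h.symm)]
          · have hcf : d.contains c0 = false := by
              rw [← Bool.not_eq_true, hcont c0]; exact hmem
            have hd1 : (if d.contains c0 = true then d else d.insert c0 (some [])) =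
                d.insert c0 (some []) := by
              rw [if_neg (by rw [hcf]; simp)]
            rw [hstep]
            simp only [if_neg hS]
            rw [hd1]
            simp only [PySem.Dict.get?_insert_self]
            rw [PySem.Dict.insert_insert_self]
            refine ⟨?_, ?_⟩
            · rw [PySem.Dict.keys_insert_of_not_contains _ _ hcf, hk, classesOf_append, hcl,
                PySem.Set.add_of_not_mem (by rw [classesOf, PySem.Set.mem_ofList]; exact hmem)]
            · intro c ω
              rw [PySem.Dict.getD_insert]
              by_cases hc : c = c0
              · subst hc
                simp [hmem_iff, hcl, metsOf_append, hmo, metsOf_eq_nil_of_not_mem hmem,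
                  (show c ∉ S from fun h => hS ((PySem.Set.contains_iff S c).2 h))]
              · rw [if_neg hc, hv c ω]
                by_cases hcm : c ∈ l.map classOf
                · simp [hmem_iff, metsOf_append, hcm, hcl,
                    (show ¬ (c0 = c) from fun h => hc h.symm)]
                · simp [hmem_iff, hcm, hc, hcl,
                    (show ¬ (c0 = c) from fun h => hc h.symm)]
      · have h1' : PySem.Str.isIn "." t = false := by
          rw [← Bool.not_eq_true]; exact h1
        obtain ⟨hclb, hmob⟩ := classOf_bare t h1'
        have hstep : stepB S d t =
            (if d.contains t = true then d
             else d.insert t (if PySem.Set.contains S t = true then none else some [])) := by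
          rw [stepB, if_neg h1]
        rw [hstep]
        by_cases hmem : t ∈ l.map classOf
        · rw [if_pos ((hcont t).2 hmem)]
          refine ⟨by rw [hk, classesOf_append, hclb,
            PySem.Set.add_of_mem (by rw [classesOf, PySem.Set.mem_ofList]; exact hmem)], ?_⟩
          intro c ω
          rw [hv c ω]
          by_cases hc : c = t
          · subst hc; simp [hmem_iff, hclb, hmem, metsOf_append, hmob]
          · by_cases hcm : c ∈ l.map classOf
            · simp [hmem_iff, metsOf_append, hcm, hclb, hmob,
                (show ¬ (t = c) from fun h => hc h.symm)]
            · simp [hmem_iff, hcm, hc, hclb,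
                (show ¬ (t = c) from fun h => hc h.symm)]
        · have hcf : d.contains t = false := by
            rw [← Bool.not_eq_true, hcont t]; exact hmem
          rw [if_neg (by rw [hcf]; simp)]
          refine ⟨?_, ?_⟩
          · rw [PySem.Dict.keys_insert_of_not_contains _ _ hcf, hk, classesOf_append, hclb,
              PySem.Set.add_of_not_mem (by rw [classesOf, PySem.Set.mem_ofList]; exact hmem)]
          · intro c ω
            rw [PySem.Dict.getD_insert]
            by_cases hc : c = t
            · subst hc
              simp [hmem_iff, hclb, metsOf_append, hmob, metsOf_eq_nil_of_not_mem hmem]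
            · rw [if_neg hc, hv c ω]
              by_cases hcm : c ∈ l.map classOf
              · simp [hmem_iff, metsOf_append, hcm, hclb, hmob,
                  (show ¬ (t = c) from fun h => hc h.symm)]
              · simp [hmem_iff, hcm, hc, hclb,
                  (show ¬ (t = c) from fun h => hc h.symm)]

-- ===== VERDICT (by name: the statement is the Claim_ definition above) =====
theorem compute_selected_tests_py_spec : Claim_equal_compute_selected_tests_py := by
  intro l _ hpre
  unfold Spec_compute_selected_tests_py compute_selected_tests_py compute_selected_tests_py_alt
  obtain ⟨hkA, hvA⟩ := foldA_char l hpre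
  obtain ⟨hkB, hvB⟩ := foldB_char (bareSetB l) l hpre
  have hnodup : (classesOf l).Nodup := PySem.Set.nodup_ofList _
  rw [PySem.Dict.items_eq_map_keys _ (by rw [hkA]; exact hnodup) none,
      PySem.Dict.items_eq_map_keys _ (by rw [hkB]; exact hnodup) none,
      hkA, hkB]
  refine List.map_congr_left ?_
  intro k hk
  have hkmem : k ∈ l.map classOf := (PySem.Set.mem_ofList _ _).1 hk
  have hbare : (PySem.Set.contains (bareSetB l) k = true) ↔ k ∈ bares l := by
    rw [PySem.Set.contains_iff, bareSetB, PySem.Set.mem_ofList]; rfl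
  rw [hvA, hvB, if_pos hkmem, if_pos hkmem]
  by_cases hb : k ∈ bares l
  · rw [if_pos hb, if_pos (hbare.2 hb)]
  · rw [if_neg hb, if_neg (fun h => hb (hbare.1 h))]
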